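-- pv_equiv track=rewrite | github.com/THUMLP/NLI4CT | textual_entailment/run_512_tf_bi_cl.py | convert_evidence_label
-- ===== SOURCE A (Python) =====
-- def convert_evidence_label(evidence_label, evidence_len):
--     new_label = []
--     for i in range(evidence_len):
--         if i in evidence_label:
--             new_label.append(1)
--         else:
--             new_label.append(0)
--     return new_label
-- ===== SOURCE B (Python) =====
-- def convert_evidence_label(evidence_label, evidence_len):
--     new_label = [0] * max(evidence_len, 0)
--     for v in evidence_label:
--         if 0 <= v < evidence_len:
--             new_label[v] = 1
--     return new_label
-- ===== Notes on version B (the rewrite author's own statement) =====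
-- stated objective: faster
-- what changed: B preallocates a zero array and scatters a 1 at each in-range label value, instead of gathering with an O(len(evidence_label)) membership test for every index of range(evidence_len).
import Mathlib
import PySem

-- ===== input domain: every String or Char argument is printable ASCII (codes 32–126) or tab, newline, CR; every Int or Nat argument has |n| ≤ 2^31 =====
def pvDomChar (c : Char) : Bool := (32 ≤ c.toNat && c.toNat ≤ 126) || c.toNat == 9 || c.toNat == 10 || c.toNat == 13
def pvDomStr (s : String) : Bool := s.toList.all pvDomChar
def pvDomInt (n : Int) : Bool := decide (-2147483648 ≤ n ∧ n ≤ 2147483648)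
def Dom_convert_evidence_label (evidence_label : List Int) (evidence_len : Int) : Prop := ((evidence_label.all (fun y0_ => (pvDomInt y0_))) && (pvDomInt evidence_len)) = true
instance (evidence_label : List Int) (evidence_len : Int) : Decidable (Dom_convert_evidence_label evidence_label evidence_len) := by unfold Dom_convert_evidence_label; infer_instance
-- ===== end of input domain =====

-- B replaces A's per-index membership gather with a preallocated zero array and a single
-- scatter pass over the label values (asymptotically faster; return value proved equal).

-- ===== PORT A =====
-- for i in range(evidence_len): append 1 if i in evidence_label else 0
def convert_evidence_label (evidence_label : List Int) (evidence_len : Int) : List Int :=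
  (PySem.List.pyRange 0 evidence_len 1).foldl
    (fun new_label i => if i ∈ evidence_label then new_label ++ [1] else new_label ++ [0]) []

-- ===== PORT B =====
-- new_label = [0]*max(evidence_len,0); for v in evidence_label: if 0<=v<evidence_len: new_label[v]=1
def convert_evidence_label_alt (evidence_label : List Int) (evidence_len : Int) : List Int :=
  evidence_label.foldl
    (fun new_label v => if 0 ≤ v ∧ v < evidence_len then new_label.set v.toNat 1 else new_label)
    (List.replicate (max evidence_len 0).toNat 0)

-- ===== PRECONDITION & SPEC =====
def Spec_convert_evidence_label (evidence_label : List Int) (evidence_len : Int) (out : List Int) : Prop := out = convert_evidence_label_alt evidence_label evidence_len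
instance (evidence_label : List Int) (evidence_len : Int) (out : List Int) : Decidable (Spec_convert_evidence_label evidence_label evidence_len out) := by unfold Spec_convert_evidence_label; infer_instance

-- ===== CLAIM (what is proved, stated in full; the proofs are below) =====
def Claim_equal_convert_evidence_label : Prop := ∀ (evidence_label : List Int) (evidence_len : Int), Dom_convert_evidence_label evidence_label evidence_len → Spec_convert_evidence_label evidence_label evidence_len (convert_evidence_label evidence_label evidence_len)

-- ===== LEMMAS AND PROOFS =====

theorem gather_eq_map (el : List Int) (l : List Int) (acc : List Int) :
    l.foldl (fun a i => if i ∈ el then a ++ [(1:Int)] else a ++ [0]) acc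
      = acc ++ l.map (fun i => if i ∈ el then 1 else 0) := by
  induction l generalizing acc with
  | nil => simp
  | cons h t ih =>
      simp only [List.foldl_cons, List.map_cons]
      split <;> rw [ih] <;> simp

theorem scatter_length (n : Int) (el : List Int) (acc : List Int) :
    (el.foldl (fun a v => if 0 ≤ v ∧ v < n then a.set v.toNat 1 else a) acc).length
      = acc.length := by
  induction el generalizing acc with
  | nil => rfl
  | cons h t ih =>
      simp only [List.foldl_cons]
      rw [ih]
      split <;> simp

theorem scatter_getElem? (n : Int) (el : List Int) (acc : List Int) (k : Nat)
    (hk : k < acc.length) (hkn : (k : Int) < n) :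
    (el.foldl (fun a v => if 0 ≤ v ∧ v < n then a.set v.toNat 1 else a) acc)[k]?
      = some (if (k : Int) ∈ el then 1 else acc.getD k 0) := by
  induction el generalizing acc with
  | nil =>
      simp [List.getD_eq_getElem?_getD, List.getElem?_eq_getElem hk]
  | cons v t ih =>
      simp only [List.foldl_cons]
      by_cases hg : 0 ≤ v ∧ v < n
      · rw [if_pos hg]
        have hlen : k < (acc.set v.toNat 1).length := by simpa using hk
        rw [ih _ hlen]
        by_cases ht : (k : Int) ∈ t
        · simp [ht]
        · by_cases hv : v = (k : Int)
          · have hvk : v.toNat = k := by omega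
            have hset : (acc.set k 1)[k]?.getD 0 = 1 := by
              rw [List.getElem?_eq_getElem (by simpa using hk)]
              simp
            simp [ht, hv, hset]
          · have hvk : v.toNat ≠ k := by omega
            have hmem : ((k : Int) ∈ v :: t) ↔ ((k : Int) ∈ t) := by
              simp [hv, eq_comm]
            simp [ht, hmem, List.getD_eq_getElem?_getD, List.getElem?_set_ne hvk]
      · rw [if_neg hg]
        rw [ih _ hk]
        have hv : v ≠ (k : Int) := by omega
        have hmem : ((k : Int) ∈ v :: t) ↔ ((k : Int) ∈ t) := by
          simp [hv, eq_comm]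
        simp [hmem]

-- ===== VERDICT (by name: the statement is the Claim_ definition above) =====
theorem convert_evidence_label_spec : Claim_equal_convert_evidence_label := by
  intro el n _
  unfold Spec_convert_evidence_label convert_evidence_label convert_evidence_label_alt
  rw [PySem.List.pyRange_one, gather_eq_map]
  set m : Nat := (max n 0).toNat with hm
  have hmn : (n - 0).toNat = m := by omega
  rw [hmn]
  apply List.ext_getElem?
  intro k
  by_cases hk : k < m
  · have hkn : (k : Int) < n := by omega
    rw [scatter_getElem? n el _ k (by simpa using hk) hkn]
    have hrep : (List.replicate m (0:Int)).getD k 0 = 0 := by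
      simp [List.getD_eq_getElem?_getD]
    rw [hrep]
    simp [hk]
  · rw [List.getElem?_eq_none, List.getElem?_eq_none]
    · rw [scatter_length]; simp; omega
    · simp; omega
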